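-- pv_equiv track=rewrite | github.com/MAInformatico/Codewars | 6kyu/FindCracker.py | find_hack
-- ===== SOURCE A (Python) =====
-- def find_hack(arr):
--     result = list()
--
--     for i in range(len(arr)) :
--         prevScore = arr[i][1]
--         sumScore = 0
--
--         if prevScore > 200 :
--             result.append(arr[i][0])
--             continue
--
--         if gradeCheck(arr[i][2]) :
--             sumScore += 20
--
--         for j in range(len(arr[i][2])) :
--             sumScore += convertScore(arr[i][2][j])
--             if sumScore > 200 :
--                 sumScore = 200
--                 break
--
--         if prevScore != sumScore :
--             result.append(arr[i][0])
--
--     return result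
--
-- def gradeCheck(valuesList) :
--     if( len(valuesList) < 5 ) :
--         return False
--
--     for i in range(len(valuesList)) :
--         if valuesList[i] != 'A' and valuesList[i] != 'B' :
--             return False
--     return True
--
-- def convertScore(score) :
--     return change(score)
--
-- def change(value) :
--     return {
--         'A' : 30,
--         'B' : 20,
--         'C' : 10,
--         'D' : 5
--     }.get(value, 0)
-- ===== SOURCE B (Python) =====
-- def find_hack(arr):
--     out = []
--     for name, claimed, grades in arr:
--         counts = {}
--         for g in grades:
--             counts[g] = counts.get(g, 0) + 1
--         a = counts.get('A', 0)
--         b = counts.get('B', 0)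
--         bonus = 20 if len(grades) >= 5 and a + b == len(grades) else 0
--         total = bonus + 30*a + 20*b + 10*counts.get('C', 0) + 5*counts.get('D', 0)
--         if claimed != min(200, total):
--             out.append(name)
--     return out
-- ===== Notes on version B (the rewrite author's own statement) =====
-- stated objective: alternative
-- what changed: Replaces A's per-grade accumulator with break-and-clamp, gradeCheck scan and change lookup table by building a frequency histogram of the grades once and computing the score as a closed form from the four letter counts (bonus iff count('A')+count('B') equals the length), clamped with min(200, .); the redundant prevScore>200 branch disappears.
import Mathlib
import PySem

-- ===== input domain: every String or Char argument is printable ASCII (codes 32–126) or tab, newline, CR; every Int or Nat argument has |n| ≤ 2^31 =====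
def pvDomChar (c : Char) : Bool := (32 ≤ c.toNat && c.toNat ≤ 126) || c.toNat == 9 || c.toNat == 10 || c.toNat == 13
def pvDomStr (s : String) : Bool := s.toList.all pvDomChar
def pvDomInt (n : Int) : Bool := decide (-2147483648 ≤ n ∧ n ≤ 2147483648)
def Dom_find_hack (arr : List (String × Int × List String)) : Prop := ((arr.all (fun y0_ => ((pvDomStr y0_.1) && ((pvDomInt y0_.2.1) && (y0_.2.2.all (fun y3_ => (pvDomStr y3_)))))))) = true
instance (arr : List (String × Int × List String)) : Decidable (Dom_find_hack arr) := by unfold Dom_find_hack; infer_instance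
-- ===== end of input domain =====

-- B builds a frequency histogram of each player's grades once and computes the score as a
-- closed form from the four letter counts (alternative decomposition; same cost).

-- ===== PORT A =====
def aChange (value : String) : Int :=
  if value = "A" then 30 else if value = "B" then 20
  else if value = "C" then 10 else if value = "D" then 5 else 0

def aConvertScore (score : String) : Int := aChange score

def aGradeLoop : List String → Bool
  | [] => true
  | v :: rest => if v ≠ "A" ∧ v ≠ "B" then false else aGradeLoop rest

def aGradeCheck (valuesList : List String) : Bool :=
  if valuesList.length < 5 then false else aGradeLoop valuesList

-- the inner 'for j' loop with its break-and-clamp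
def aSumLoop : List String → Int → Int
  | [], s => s
  | g :: rest, s =>
      let s' := s + aConvertScore g
      if s' > 200 then 200 else aSumLoop rest s'

def aMainLoop : List (String × Int × List String) → List String
  | [] => []
  | (name, prevScore, grades) :: rest =>
      if prevScore > 200 then name :: aMainLoop rest
      else
        let s0 : Int := if aGradeCheck grades then 20 else 0
        let sumScore := aSumLoop grades s0
        if prevScore ≠ sumScore then name :: aMainLoop rest else aMainLoop rest

def find_hack (arr : List (String × Int × List String)) : List String := aMainLoop arr

-- ===== PORT B =====
-- counts = {}; for g in grades: counts[g] = counts.get(g, 0) + 1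
def bCounts (gs : List String) : PySem.Dict String Int :=
  gs.foldl (fun d g => d.insert g (d.getD g 0 + 1)) PySem.Dict.empty

def bMainLoop : List (String × Int × List String) → List String
  | [] => []
  | (name, claimed, grades) :: rest =>
      let counts := bCounts grades
      let a := counts.getD "A" 0
      let b := counts.getD "B" 0
      let bonus : Int := if 5 ≤ grades.length ∧ a + b = (grades.length : Int) then 20 else 0
      let total := bonus + 30*a + 20*b + 10*counts.getD "C" 0 + 5*counts.getD "D" 0
      if claimed ≠ min 200 total then name :: bMainLoop rest else bMainLoop rest

def find_hack_alt (arr : List (String × Int × List String)) : List String := bMainLoop arr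

-- ===== PRECONDITION & SPEC =====
def Spec_find_hack (arr : List (String × Int × List String)) (out : List String) : Prop := out = find_hack_alt arr
instance (arr : List (String × Int × List String)) (out : List String) : Decidable (Spec_find_hack arr out) := by unfold Spec_find_hack; infer_instance

-- ===== CLAIM (what is proved, stated in full; the proofs are below) =====
def Claim_equal_find_hack : Prop := ∀ (arr : List (String × Int × List String)), Dom_find_hack arr → Spec_find_hack arr (find_hack arr)

-- ===== LEMMAS AND PROOFS =====
theorem bCounts_getD (gs : List String) (v : String) :
    (bCounts gs).getD v 0 = (gs.count v : Int) := by
  unfold bCounts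
  rw [PySem.Dict.getD_foldl_insert_add_one]
  simp [PySem.Dict.empty, PySem.Dict.getD, PySem.Dict.get?]

theorem aChange_nonneg (v : String) : 0 ≤ aChange v := by
  unfold aChange; split_ifs <;> norm_num

theorem aSum_nonneg (gs : List String) : 0 ≤ (gs.map aChange).sum := by
  induction gs with
  | nil => simp
  | cons g rest ih =>
      simp only [List.map_cons, List.sum_cons]
      have := aChange_nonneg g
      omega

-- A's break-and-clamp loop equals the clamped total sum (grade values are nonnegative).
theorem aSumLoop_eq (gs : List String) : ∀ s : Int, s ≤ 200 →
    aSumLoop gs s = min 200 (s + (gs.map aChange).sum) := by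
  induction gs with
  | nil => intro s hs; simp [aSumLoop]; omega
  | cons g rest ih =>
      intro s hs
      simp only [aSumLoop, aConvertScore, List.map_cons, List.sum_cons]
      by_cases h : s + aChange g > 200
      · have hrest := aSum_nonneg rest
        simp only [h, if_pos]
        omega
      · simp only [h, if_neg, not_false_iff]
        rw [ih (s + aChange g) (by omega)]
        ring_nf

-- the grade sum as a closed form of the four letter counts
theorem aSum_counts (gs : List String) :
    (gs.map aChange).sum =
      30*(gs.count "A" : Int) + 20*(gs.count "B" : Int)
      + 10*(gs.count "C" : Int) + 5*(gs.count "D" : Int) := by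
  induction gs with
  | nil => simp
  | cons g rest ih =>
      simp only [List.map_cons, List.sum_cons, ih, List.count_cons]
      unfold aChange
      by_cases h1 : g = "A" <;> by_cases h2 : g = "B" <;>
        by_cases h3 : g = "C" <;> by_cases h4 : g = "D" <;>
        simp_all <;> ring

theorem aGradeLoop_all (gs : List String) :
    aGradeLoop gs = gs.all (fun v => v == "A" || v == "B") := by
  induction gs with
  | nil => simp [aGradeLoop]
  | cons g rest ih =>
      simp only [aGradeLoop, List.all_cons, ih]
      by_cases h1 : g = "A" <;> by_cases h2 : g = "B" <;> simp [h1, h2]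

theorem all_count_AB (gs : List String) :
    gs.all (fun v => v == "A" || v == "B") = decide (gs.count "A" + gs.count "B" = gs.length) := by
  induction gs with
  | nil => simp
  | cons g rest ih =>
      have hA := List.count_le_length (l := rest) (a := "A")
      have hB := List.count_le_length (l := rest) (a := "B")
      have hAB : rest.count "A" + rest.count "B" ≤ rest.length := by
        have h := List.length_eq_countP_add_countP (l := rest) (p := fun v => v == "A")
        have h1 : rest.count "A" = rest.countP (fun v => v == "A") := rfl
        simp only [decide_not, Bool.decide_eq_true] at h
        have h2 : rest.count "B" ≤ rest.countP (fun v => !(v == "A")) := by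
          apply List.countP_mono_left
          intro x hx hb
          simp_all
        omega
      simp only [List.all_cons, List.count_cons, List.length_cons, ih]
      by_cases h1 : g = "A"
      · subst h1
        simp only [beq_self_eq_true, Bool.true_or, Bool.true_and]
        have : (("A":String) == "B") = false := by decide
        simp only [this]
        by_cases h : rest.count "A" + rest.count "B" = rest.length <;> simp [h] <;> omega
      · by_cases h2 : g = "B"
        · subst h2
          have hBA : (("B":String) == "A") = false := by decide
          simp only [hBA, beq_self_eq_true, Bool.or_true, Bool.true_and]
          by_cases h : rest.count "A" + rest.count "B" = rest.length <;> simp [h] <;> omega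
        · have e1 : (g == "A") = false := by simp [h1]
          have e2 : (g == "B") = false := by simp [h2]
          simp only [e1, e2, Bool.or_self, Bool.false_and]
          have : ¬ (rest.count "A" + rest.count "B" = rest.length + 1) := by omega
          simp [this]

theorem aGradeCheck_eq (gs : List String) :
    aGradeCheck gs = decide (5 ≤ gs.length ∧ (gs.count "A" : Int) + (gs.count "B" : Int) = (gs.length : Int)) := by
  unfold aGradeCheck
  rw [aGradeLoop_all, all_count_AB]
  have hcast : ((gs.count "A" : Int) + (gs.count "B" : Int) = (gs.length : Int)) ↔
      (gs.count "A" + gs.count "B" = gs.length) := by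
    constructor <;> intro h <;> omega
  by_cases h5 : gs.length < 5
  · have : ¬ (5 ≤ gs.length) := by omega
    simp [h5, this]
  · have h5' : 5 ≤ gs.length := by omega
    by_cases hc : gs.count "A" + gs.count "B" = gs.length
    · simp [h5, h5', hc, hcast]
    · simp [h5, h5', hc, hcast]

theorem main_eq (arr : List (String × Int × List String)) :
    aMainLoop arr = bMainLoop arr := by
  induction arr with
  | nil => rfl
  | cons p rest ih =>
      obtain ⟨name, claimed, grades⟩ := p
      have hs0 : (if aGradeCheck grades then (20:Int) else 0) ≤ 200 := by
        split_ifs <;> norm_num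
      have hsum : aSumLoop grades (if aGradeCheck grades then (20:Int) else 0) =
          min 200 ((if 5 ≤ grades.length ∧ (bCounts grades).getD "A" 0 + (bCounts grades).getD "B" 0 = (grades.length : Int) then (20:Int) else 0)
            + 30*(bCounts grades).getD "A" 0 + 20*(bCounts grades).getD "B" 0
            + 10*(bCounts grades).getD "C" 0 + 5*(bCounts grades).getD "D" 0) := by
        rw [aSumLoop_eq grades _ hs0, aSum_counts, aGradeCheck_eq]
        simp only [bCounts_getD, decide_eq_true_eq]
        by_cases h : 5 ≤ grades.length ∧ (grades.count "A" : Int) + (grades.count "B" : Int) = (grades.length : Int)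
        · simp only [if_pos h]; ring_nf
        · simp only [if_neg h]; ring_nf
      simp only [aMainLoop, bMainLoop, ih, hsum]
      by_cases hgt : claimed > 200
      · have : claimed ≠ min 200 ((if 5 ≤ grades.length ∧ (bCounts grades).getD "A" 0 + (bCounts grades).getD "B" 0 = (grades.length : Int) then (20:Int) else 0)
            + 30*(bCounts grades).getD "A" 0 + 20*(bCounts grades).getD "B" 0
            + 10*(bCounts grades).getD "C" 0 + 5*(bCounts grades).getD "D" 0) := by
          have := min_le_left (200:Int) ((if 5 ≤ grades.length ∧ (bCounts grades).getD "A" 0 + (bCounts grades).getD "B" 0 = (grades.length : Int) then (20:Int) else 0)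
            + 30*(bCounts grades).getD "A" 0 + 20*(bCounts grades).getD "B" 0
            + 10*(bCounts grades).getD "C" 0 + 5*(bCounts grades).getD "D" 0)
          omega
        simp [hgt, this]
      · simp [hgt]

-- ===== VERDICT (by name: the statement is the Claim_ definition above) =====
theorem find_hack_spec : Claim_equal_find_hack := by
  intro arr _
  unfold Spec_find_hack find_hack find_hack_alt
  exact main_eq arr
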